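-- pv_equiv track=rewrite | github.com/sofide/ai-practices | liquiditos.py | result
-- ===== SOURCE A (Python) =====
-- def result(state, action):
--     origin_index, destination_index = action
--     origin_tube = list(state[origin_index])
--     destination_tube = list(state[destination_index])
--
--     # check which color is the liquid to transfer
--     top_color_origin_index = 0
--     color_to_transfer = origin_tube[top_color_origin_index]
--     while color_to_transfer is None:
--         top_color_origin_index += 1
--         color_to_transfer = origin_tube[top_color_origin_index]
--
--     # check how much liquid can be transfered
--     next_color_index = top_color_origin_index + 1
--     while next_color_index < len(origin_tube) and origin_tube[next_color_index] == color_to_transfer: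
--         next_color_index += 1
--
--     how_much_liquid_can_give = next_color_index - top_color_origin_index
--     how_much_liquid_can_receive = destination_tube.count(None)
--
--     liquid_to_move = min(how_much_liquid_can_give, how_much_liquid_can_receive)
--
--     # remove liquid from origin tube
--     for slot_to_empty in range(top_color_origin_index, top_color_origin_index + liquid_to_move):
--         origin_tube[slot_to_empty] = None
--
--     # put liquid in destination tube
--     first_slot_to_fill = how_much_liquid_can_receive - liquid_to_move
--     for slot_to_fill in range(first_slot_to_fill, first_slot_to_fill + liquid_to_move):
--         destination_tube[slot_to_fill] = color_to_transfer
--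
--     state = list(state)
--     state[origin_index] = tuple(origin_tube)
--     state[destination_index] = tuple(destination_tube)
--
--     return tuple(state)
-- ===== SOURCE B (Python) =====
-- def _runs(tube):
--     """Run-length encode a tube: list of [value, count] in order."""
--     runs = []
--     for slot in tube:
--         if runs and runs[-1][0] == slot:
--             runs[-1][1] += 1
--         else:
--             runs.append([slot, 1])
--     return runs
--
--
-- def _overwrite(runs, start, stop, value):
--     """Decode runs back to a tube, with positions [start, stop) replaced by value."""
--     out = []
--     pos = 0
--     for v, n in runs:
--         end = pos + n
--         a = min(max(start, pos), end)
--         b = min(max(stop, pos), end)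
--         out += [v] * (a - pos) + [value] * (b - a) + [v] * (end - b)
--         pos = end
--     return tuple(out)
--
--
-- def result(state, action):
--     origin_index, destination_index = action
--     origin_runs = _runs(state[origin_index])
--     dest_runs = _runs(state[destination_index])
--
--     if origin_runs[0][0] is None:        # IndexError on an empty origin, like A
--         blanks = origin_runs[0][1]
--         color, run_len = origin_runs[1]  # IndexError on an all-None origin, like A
--     else:
--         blanks = 0
--         color, run_len = origin_runs[0]
--
--     capacity = sum(n for v, n in dest_runs if v is None)
--     moved = min(run_len, capacity)
--
--     new_state = list(state)
--     new_state[origin_index] = _overwrite(origin_runs, blanks, blanks + moved, None)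
--     new_state[destination_index] = _overwrite(dest_runs, capacity - moved, capacity, color)
--     return tuple(new_state)
-- ===== Notes on version B (the rewrite author's own statement) =====
-- stated objective: alternative
-- what changed: A works slot-by-slot with index while/for loops mutating the two tubes in place; B run-length encodes both tubes, reads blanks/color/run length off the first one or two runs of the origin, sums the None-run counts for the capacity, and rebuilds both tubes with a shared run-level splice (decode-with-overwrite) operation.
import Mathlib
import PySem

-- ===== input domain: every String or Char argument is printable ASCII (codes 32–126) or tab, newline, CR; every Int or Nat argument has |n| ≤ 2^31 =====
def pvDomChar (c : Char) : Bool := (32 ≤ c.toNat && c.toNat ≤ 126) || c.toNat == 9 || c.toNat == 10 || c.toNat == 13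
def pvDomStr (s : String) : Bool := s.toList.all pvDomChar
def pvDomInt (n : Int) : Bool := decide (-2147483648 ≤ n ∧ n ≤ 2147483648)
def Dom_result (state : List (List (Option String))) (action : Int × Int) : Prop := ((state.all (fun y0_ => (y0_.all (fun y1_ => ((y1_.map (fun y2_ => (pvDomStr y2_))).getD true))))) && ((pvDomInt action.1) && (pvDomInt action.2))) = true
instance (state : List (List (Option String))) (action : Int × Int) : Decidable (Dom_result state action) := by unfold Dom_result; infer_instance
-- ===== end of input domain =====

-- B replaces A's slot-by-slot index loops by a run-length-encoding pipeline: both tubes are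
-- RLE-parsed, blanks/color/run length are read off the origin's first runs, the capacity is the
-- sum of the None-run counts, and both new tubes are rebuilt by one shared run-level splice.
-- Objective: alternative algorithm/data structure, same cost.

-- ===== PORT A =====
-- the first while loop of A: scan origin_tube upward until a non-None slot; none = IndexError
def findTopA (tube : List (Option String)) (i : Nat) : Option (Nat × String) :=
  if h : i < tube.length then
    match tube[i] with
    | none => findTopA tube (i + 1)
    | some c => some (i, c)
  else none
  termination_by tube.length - i
  decreasing_by omega

-- the second while loop of A: advance next_color_index while the slot equals the color
def runEndA (tube : List (Option String)) (c : String) (j : Nat) : Nat :=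
  if h : j < tube.length then
    if tube[j] == some c then runEndA tube c (j + 1) else j
  else j
  termination_by tube.length - j
  decreasing_by omega

def result (state : List (List (Option String))) (action : Int × Int) : List (List (Option String)) :=
  let origin_index := action.1
  let destination_index := action.2
  let origin_tube := (PySem.List.pyGet? state origin_index).getD []      -- IndexError (none) excluded by Pre_
  let destination_tube := (PySem.List.pyGet? state destination_index).getD []
  match findTopA origin_tube 0 with
  | none => []   -- the while loop runs past the end: IndexError, excluded by Pre_
  | some (top, color) =>
    let next_color_index := runEndA origin_tube color (top + 1)
    let how_much_liquid_can_give := next_color_index - top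
    let how_much_liquid_can_receive := PySem.List.count destination_tube none
    let liquid_to_move := min how_much_liquid_can_give how_much_liquid_can_receive
    -- for slot_to_empty in range(top, top + liquid_to_move): origin_tube[slot] = None  (indices are nonnegative)
    let origin_tube' := (List.range' top liquid_to_move).foldl (fun t k => t.set k none) origin_tube
    let first_slot_to_fill := how_much_liquid_can_receive - liquid_to_move
    let destination_tube' := (List.range' first_slot_to_fill liquid_to_move).foldl
        (fun t k => t.set k (some color)) destination_tube
    PySem.List.pySetD (PySem.List.pySetD state origin_index origin_tube') destination_index destination_tube'

-- ===== PORT B =====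
-- _runs: run-length encode a tube (the Python appends/increments the LAST run of the list)
def runStepB (runs : List (Option String × Nat)) (slot : Option String) : List (Option String × Nat) :=
  match runs.getLast? with
  | some (v, n) => if v == slot then runs.dropLast ++ [(v, n + 1)] else runs ++ [(slot, 1)]
  | none => [(slot, 1)]

def runsB (tube : List (Option String)) : List (Option String × Nat) :=
  tube.foldl runStepB []

-- _overwrite: decode the runs, with positions [start, stop) replaced by value
def overwriteB (runs : List (Option String × Nat)) (start stop : Nat) (value : Option String) :
    List (Option String) :=
  (runs.foldl (fun (acc : List (Option String) × Nat) r =>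
      let pos := acc.2
      let e := pos + r.2
      let a := min (max start pos) e
      let b := min (max stop pos) e
      (acc.1 ++ List.replicate (a - pos) r.1 ++ List.replicate (b - a) value
        ++ List.replicate (e - b) r.1, e))
    ([], 0)).1

def result_alt (state : List (List (Option String))) (action : Int × Int) : List (List (Option String)) :=
  let origin_index := action.1
  let destination_index := action.2
  let origin_runs := runsB ((PySem.List.pyGet? state origin_index).getD [])   -- IndexError excluded by Pre_
  let dest_runs := runsB ((PySem.List.pyGet? state destination_index).getD [])
  -- the if/else reading blanks, color, run_len off the first one or two runs;
  -- the [] branches are the Python's IndexErrors (empty / all-None origin), excluded by Pre_;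
  -- a second run whose value is again None cannot occur in an RLE (adjacent runs differ).
  match origin_runs with
  | [] => []
  | (v0, n0) :: rest =>
    let bcl : Option (Nat × String × Nat) :=
      match v0 with
      | none =>
        match rest with
        | [] => none
        | (v1, n1) :: _ => v1.map (fun c => (n0, c, n1))
      | some c => some (0, c, n0)
    match bcl with
    | none => []
    | some (blanks, color, run_len) =>
      let capacity := dest_runs.foldl (fun s r => if r.1 = none then s + r.2 else s) 0
      let moved := min run_len capacity
      let origin' := overwriteB origin_runs blanks (blanks + moved) none
      let dest' := overwriteB dest_runs (capacity - moved) capacity (some color)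
      PySem.List.pySetD (PySem.List.pySetD state origin_index origin') destination_index dest'

-- ===== PRECONDITION & SPEC =====
-- Pre_ excludes exactly the inputs where the Python A raises IndexError: an out-of-range tube
-- index in the action, or an origin tube with no non-None slot.
def Pre_result (state : List (List (Option String))) (action : Int × Int) : Prop :=
  PySem.Raise.InRange state.length action.1 ∧ PySem.Raise.InRange state.length action.2 ∧
  ((PySem.List.pyGet? state action.1).getD []).any (fun x => x.isSome) = true
instance (state : List (List (Option String))) (action : Int × Int) : Decidable (Pre_result state action) := by unfold Pre_result; infer_instance

def pvWitness_result : List (List (Option String)) × (Int × Int) :=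
  ([[none, some "r", some "r"], [none, some "g"]], (0, 1))

def Spec_result (state : List (List (Option String))) (action : Int × Int) (out : List (List (Option String))) : Prop := out = result_alt state action
instance (state : List (List (Option String))) (action : Int × Int) (out : List (List (Option String))) : Decidable (Spec_result state action out) := by unfold Spec_result; infer_instance

-- ===== CLAIM (what is proved, stated in full; the proofs are below) =====
def Claim_equal_result : Prop := ∀ (state : List (List (Option String))) (action : Int × Int), Dom_result state action → Pre_result state action → Spec_result state action (result state action)

-- ===== LEMMAS AND PROOFS =====

-- ---------- A-side loop characterizations ----------

-- A's first while loop finds exactly the end of the leading-None prefix (from index i)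
theorem findTopA_spec (tube : List (Option String)) (i : Nat) (h : i ≤ tube.length) :
    findTopA tube i =
      match tube[i + ((tube.drop i).takeWhile (fun x => x.isNone)).length]? with
      | some (some c) => some (i + ((tube.drop i).takeWhile (fun x => x.isNone)).length, c)
      | _ => none := by
  fun_induction findTopA tube i with
  | case1 i h' hx ih =>
    rw [ih (by omega), List.drop_eq_getElem_cons h', hx,
      List.takeWhile_cons_of_pos (p := fun x => (x : Option String).isNone) (by simp),
      List.length_cons]
    have harith : i + (((tube.drop (i + 1)).takeWhile (fun x => x.isNone)).length + 1)
        = (i + 1) + ((tube.drop (i + 1)).takeWhile (fun x => x.isNone)).length := by omega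
    rw [harith]
  | case2 i h' c hx =>
    rw [List.drop_eq_getElem_cons h', hx,
      List.takeWhile_cons_of_neg (p := fun x => (x : Option String).isNone) (by simp),
      List.length_nil, Nat.add_zero]
    have hg : tube[i]? = some (some c) := by rw [List.getElem?_eq_some_iff]; exact ⟨h', hx⟩
    rw [hg]
  | case3 i h' =>
    have hi : i = tube.length := by omega
    subst hi
    rw [List.drop_length]
    simp

-- A's second while loop: run end = j + length of the matching prefix of drop j
theorem runEndA_spec (tube : List (Option String)) (c : String) (j : Nat) (h : j ≤ tube.length) :
    runEndA tube c j = j + ((tube.drop j).takeWhile (fun x => x == some c)).length := by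
  fun_induction runEndA tube c j with
  | case1 j h' heq ih =>
    rw [ih (by omega), List.drop_eq_getElem_cons h',
      List.takeWhile_cons_of_pos (p := fun x => x == some c) (by simpa using heq),
      List.length_cons]
    omega
  | case2 j h' heq =>
    rw [List.drop_eq_getElem_cons h',
      List.takeWhile_cons_of_neg (p := fun x => x == some c) (by simpa using heq),
      List.length_nil]
    omega
  | case3 j h' =>
    have hj : j = tube.length := by omega
    subst hj
    rw [List.drop_length]
    simp

-- A's in-place fill loop is a take/replicate/drop concatenation
theorem foldl_set_range' {α : Type} (v : α) : ∀ (m a : Nat) (xs : List α), a + m ≤ xs.length →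
    (List.range' a m).foldl (fun t k => t.set k v) xs
      = xs.take a ++ List.replicate m v ++ xs.drop (a + m) := by
  intro m
  induction m with
  | zero =>
    intro a xs _
    simp [List.take_append_drop]
  | succ m ih =>
    intro a xs h
    have hlt : a + m < xs.length := by omega
    rw [List.range'_1_concat, List.foldl_append, ih a xs (by omega)]
    simp only [List.foldl_cons, List.foldl_nil]
    have hta : (xs.take a).length = a := by simp; omega
    have htr : (xs.take a ++ List.replicate m v).length = a + m := by
      simp [hta]
    rw [List.set_append, htr, if_neg (by omega), Nat.sub_self,
      List.drop_eq_getElem_cons hlt, List.set_cons_zero]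
    have hidx : a + (m + 1) = a + m + 1 := by omega
    rw [hidx, List.replicate_succ']
    simp [List.append_assoc]

-- ---------- B-side: decoding the RLE ----------

def decodeR (runs : List (Option String × Nat)) : List (Option String) :=
  runs.flatMap (fun r => List.replicate r.2 r.1)

theorem decodeR_append (r1 r2 : List (Option String × Nat)) :
    decodeR (r1 ++ r2) = decodeR r1 ++ decodeR r2 := by
  simp [decodeR]

theorem decodeR_runStepB (runs : List (Option String × Nat)) (slot : Option String) :
    decodeR (runStepB runs slot) = decodeR runs ++ [slot] := by
  rcases hlast : runs.getLast? with _ | ⟨v, n⟩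
  · have : runs = [] := List.getLast?_eq_none_iff.mp hlast
    subst this
    simp [runStepB, decodeR]
  · have hdec : runs.dropLast ++ [(v, n)] = runs := List.dropLast_append_getLast? _ hlast
    by_cases hv : (v == slot) = true
    · have hvs : v = slot := by simpa using hv
      simp only [runStepB, hlast, if_pos hv]
      conv_rhs => rw [← hdec]
      rw [decodeR_append, decodeR_append]
      subst hvs
      simp [decodeR, List.replicate_succ']
    · simp only [runStepB, hlast, if_neg hv]
      rw [decodeR_append]
      simp [decodeR]

theorem decodeR_runsB (l : List (Option String)) : decodeR (runsB l) = l := by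
  induction l using List.reverseRecOn with
  | nil => simp [runsB, decodeR]
  | append_singleton xs x ih =>
    rw [runsB, List.foldl_append, List.foldl_cons, List.foldl_nil, ← runsB,
      decodeR_runStepB, ih]

-- well-formedness of the RLE: positive counts, adjacent values distinct
def WfR (runs : List (Option String × Nat)) : Prop :=
  (∀ r ∈ runs, 1 ≤ r.2) ∧ List.IsChain (fun (a b : Option String × Nat) => a.1 ≠ b.1) runs

theorem wf_runStepB (runs : List (Option String × Nat)) (slot : Option String)
    (h : WfR runs) : WfR (runStepB runs slot) := by
  obtain ⟨hpos, hchain⟩ := h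
  rcases hlast : runs.getLast? with _ | ⟨v, n⟩
  · have : runs = [] := List.getLast?_eq_none_iff.mp hlast
    subst this
    exact ⟨by simp [runStepB], by simp [runStepB]⟩
  · have hdec : runs.dropLast ++ [(v, n)] = runs := List.dropLast_append_getLast? _ hlast
    by_cases hv : (v == slot) = true
    · simp only [runStepB, hlast, if_pos hv]
      constructor
      · intro r hr
        rcases List.mem_append.mp hr with hr | hr
        · exact hpos r (by rw [← hdec]; exact List.mem_append.mpr (Or.inl hr))
        · simp at hr; subst hr; omega
      · rw [← hdec] at hchain
        rw [List.isChain_append] at hchain ⊢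
        refine ⟨hchain.1, by simp, ?_⟩
        intro x hx y hy
        simp at hy
        subst hy
        exact fun hxy => hchain.2.2 x hx (v, n) (by simp) hxy
    · simp only [runStepB, hlast, if_neg hv]
      constructor
      · intro r hr
        rcases List.mem_append.mp hr with hr | hr
        · exact hpos r hr
        · simp at hr; subst hr; omega
      · rw [List.isChain_append]
        refine ⟨hchain, by simp, ?_⟩
        intro x hx y hy
        simp at hy
        subst hy
        rw [hlast] at hx
        simp at hx
        subst hx
        simpa using hv

theorem wf_runsB (l : List (Option String)) : WfR (runsB l) := by
  induction l using List.reverseRecOn with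
  | nil => exact ⟨by simp [runsB], by simp [runsB]⟩
  | append_singleton xs x ih =>
    rw [runsB, List.foldl_append, List.foldl_cons, List.foldl_nil, ← runsB]
    exact wf_runStepB _ _ ih

-- the capacity fold sums the None-run counts = count of None in the decoded tube
theorem capacity_fold (runs : List (Option String × Nat)) : ∀ (acc : Nat),
    runs.foldl (fun s r => if r.1 = none then s + r.2 else s) acc
      = acc + (decodeR runs).count none := by
  induction runs with
  | nil => intro acc; simp [decodeR]
  | cons r rs ih =>
    intro acc
    rw [List.foldl_cons, ih]
    have : decodeR (r :: rs) = List.replicate r.2 r.1 ++ decodeR rs := by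
      simp [decodeR]
    rw [this, List.count_append]
    rcases r with ⟨v, n⟩
    by_cases hv : v = none
    · subst hv
      simp [List.count_replicate]
      omega
    · rw [if_neg (by simpa using hv)]
      rw [List.count_replicate, if_neg (by simpa using hv)]
      omega

-- ---------- the splice spec: elementwise overwrite of [s,t) ----------

def spl (s t : Nat) (val : Option String) : Nat → List (Option String) → List (Option String)
  | _, [] => []
  | pos, x :: xs => (if s ≤ pos ∧ pos < t then val else x) :: spl s t val (pos + 1) xs

theorem spl_length (s t : Nat) (val : Option String) :
    ∀ (pos : Nat) (l : List (Option String)), (spl s t val pos l).length = l.length := by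
  intro pos l
  induction l generalizing pos with
  | nil => simp [spl]
  | cons x xs ih => simp [spl, ih]

theorem spl_getElem (s t : Nat) (val : Option String) :
    ∀ (l : List (Option String)) (pos k : Nat) (h : k < l.length),
    (spl s t val pos l)[k]'(by rw [spl_length]; exact h)
      = if s ≤ pos + k ∧ pos + k < t then val else l[k] := by
  intro l
  induction l with
  | nil => intro pos k h; simp at h
  | cons x xs ih =>
    intro pos k h
    cases k with
    | zero => simp [spl]
    | succ k =>
      have := ih (pos + 1) k (by simpa using Nat.lt_of_succ_lt_succ h)
      simp only [spl, List.getElem_cons_succ, this]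
      have harith : pos + 1 + k = pos + (k + 1) := by omega
      rw [harith]

theorem spl_append (s t : Nat) (val : Option String) :
    ∀ (l1 l2 : List (Option String)) (pos : Nat),
    spl s t val pos (l1 ++ l2) = spl s t val pos l1 ++ spl s t val (pos + l1.length) l2 := by
  intro l1
  induction l1 with
  | nil => intro l2 pos; simp [spl]
  | cons x xs ih =>
    intro l2 pos
    simp only [List.cons_append, spl, ih, List.length_cons]
    have : pos + 1 + xs.length = pos + (xs.length + 1) := by omega
    rw [this]

-- one run, spliced: the three replicates the fold appends
theorem spl_replicate (s t : Nat) (val : Option String) (pos n : Nat) (v : Option String)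
    (hst : s ≤ t) :
    spl s t val pos (List.replicate n v)
      = List.replicate (min (max s pos) (pos + n) - pos) v
        ++ List.replicate (min (max t pos) (pos + n) - min (max s pos) (pos + n)) val
        ++ List.replicate (pos + n - min (max t pos) (pos + n)) v := by
  apply List.ext_getElem
  · rw [spl_length]
    simp only [List.length_replicate, List.length_append]
    omega
  · intro k h1 h2
    have hk : k < n := by rw [spl_length] at h1; simpa using h1
    rw [spl_getElem s t val (List.replicate n v) pos k (by simpa using hk)]
    simp only [List.getElem_append, List.length_replicate, List.length_append,
      List.getElem_replicate]
    split_ifs <;> first | rfl | (exfalso; omega)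

-- the fold in overwriteB computes the splice of the decoded runs
theorem overwriteB_fold (s t : Nat) (val : Option String) (hst : s ≤ t) :
    ∀ (runs : List (Option String × Nat)) (acc : List (Option String)) (pos : Nat),
    runs.foldl (fun (acc : List (Option String) × Nat) r =>
        let pos := acc.2
        let e := pos + r.2
        let a := min (max s pos) e
        let b := min (max t pos) e
        (acc.1 ++ List.replicate (a - pos) r.1 ++ List.replicate (b - a) val
          ++ List.replicate (e - b) r.1, e)) (acc, pos)
      = (acc ++ spl s t val pos (decodeR runs), pos + (decodeR runs).length) := by
  intro runs
  induction runs with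
  | nil => intro acc pos; simp [decodeR, spl]
  | cons r rs ih =>
    intro acc pos
    rw [List.foldl_cons]
    simp only []
    rw [ih]
    have hdec : decodeR (r :: rs) = List.replicate r.2 r.1 ++ decodeR rs := by
      simp [decodeR]
    rw [hdec, spl_append, spl_replicate _ _ _ _ _ _ hst]
    simp [List.append_assoc]
    omega

theorem overwriteB_eq (l : List (Option String)) (s t : Nat) (val : Option String)
    (hst : s ≤ t) :
    overwriteB (runsB l) s t val = spl s t val 0 l := by
  unfold overwriteB
  rw [overwriteB_fold s t val hst, decodeR_runsB]
  simp

-- closed form of the splice when t ≤ length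
theorem spl_eq_take_rep_drop (l : List (Option String)) (s t : Nat) (val : Option String)
    (hst : s ≤ t) (ht : t ≤ l.length) :
    spl s t val 0 l = l.take s ++ List.replicate (t - s) val ++ l.drop t := by
  apply List.ext_getElem
  · rw [spl_length]
    simp only [List.length_append, List.length_take, List.length_replicate, List.length_drop]
    omega
  · intro k h1 h2
    have hk : k < l.length := by rw [spl_length] at h1; exact h1
    rw [spl_getElem s t val l 0 k hk]
    simp only [Nat.zero_add, List.getElem_append, List.length_take, List.length_replicate,
      List.length_append, List.getElem_take, List.getElem_replicate, List.getElem_drop]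
    split_ifs <;> first | rfl | (exfalso; omega) | (congr 1; omega)

-- takeWhile over a replicate whose element satisfies p
theorem takeWhile_replicate_append (p : Option String → Bool) (n : Nat) (v : Option String)
    (hv : p v = true) (l : List (Option String)) :
    (List.replicate n v ++ l).takeWhile p = List.replicate n v ++ l.takeWhile p := by
  induction n with
  | zero => simp
  | succ n ih =>
    rw [List.replicate_succ, List.cons_append, List.takeWhile_cons_of_pos hv, ih,
      List.cons_append]

-- head of the decoded tail is its first run's value, hence not the transferred color
theorem decodeR_head_ne (rest2 : List (Option String × Nat)) (c : String)
    (hw : ∀ r ∈ rest2, 1 ≤ r.2) (hh : ∀ r ∈ rest2.head?, r.1 ≠ some c) :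
    ∀ x ∈ (decodeR rest2).head?, x ≠ some c := by
  cases rest2 with
  | nil => simp [decodeR]
  | cons r rs =>
    rcases r with ⟨v, n⟩
    have hn : 1 ≤ n := hw (v, n) (by simp)
    cases n with
    | zero => omega
    | succ n =>
      have hv : v ≠ some c := by simpa using hh (v, n + 1) (by simp)
      simp [decodeR, List.replicate_succ]
      exact hv

-- the three scan quantities of A, read off the replicate/replicate/tail decomposition
theorem parse_facts (l : List (Option String)) (p L : Nat) (c : String)
    (tl : List (Option String))
    (heq : l = List.replicate p none ++ (List.replicate L (some c) ++ tl))
    (hL : 1 ≤ L) (htail : ∀ x ∈ tl.head?, x ≠ some c) :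
    ((l.takeWhile (fun x => x.isNone)).length = p) ∧ l[p]? = some (some c) ∧
    ((l.drop p).takeWhile (fun x => x == some c)).length = L := by
  subst heq
  have hdropp : (List.replicate p (none : Option String)
      ++ (List.replicate L (some c) ++ tl)).drop p = List.replicate L (some c) ++ tl := by
    rw [List.drop_append_of_le_length (by simp)]
    simp
  refine ⟨?_, ?_, ?_⟩
  · rw [takeWhile_replicate_append _ _ _ (by simp)]
    cases L with
    | zero => omega
    | succ L =>
      rw [List.replicate_succ, List.cons_append,
        List.takeWhile_cons_of_neg (by simp), List.append_nil, List.length_replicate]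
  · rw [List.getElem?_append_right (by simp), List.length_replicate, Nat.sub_self,
      List.getElem?_append_left (by simp; omega), List.getElem?_replicate, if_pos (by omega)]
  · rw [hdropp, takeWhile_replicate_append _ _ _ (by simp)]
    have : tl.takeWhile (fun x => x == some c) = [] := by
      cases tl with
      | nil => rfl
      | cons x xs =>
        have hx : x ≠ some c := by simpa using htail x (by simp)
        rw [List.takeWhile_cons_of_neg (by simpa using hx)]
    rw [this, List.append_nil, List.length_replicate]

-- the shared finish: once (blanks p, color c, run length L) are read off the origin,
-- A's two mutation loops and B's two run splices build the same two tubes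
theorem result_core (state : List (List (Option String))) (action : Int × Int)
    (origin dest : List (Option String)) (rs : List (Option String × Nat))
    (p L : Nat) (c : String) (tl : List (Option String))
    (hrs : runsB origin = rs)
    (heq : origin = List.replicate p none ++ (List.replicate L (some c) ++ tl))
    (hL : 1 ≤ L) (htail : ∀ x ∈ tl.head?, x ≠ some c) :
    PySem.List.pySetD (PySem.List.pySetD state action.1
        ((List.range' p (min (runEndA origin c (p + 1) - p) (PySem.List.count dest none))).foldl
          (fun t k => t.set k none) origin)) action.2
      ((List.range'
          (PySem.List.count dest none
            - min (runEndA origin c (p + 1) - p) (PySem.List.count dest none))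
          (min (runEndA origin c (p + 1) - p) (PySem.List.count dest none))).foldl
        (fun t k => t.set k (some c)) dest)
    = PySem.List.pySetD (PySem.List.pySetD state action.1
        (overwriteB rs p
          (p + min L ((runsB dest).foldl (fun s r => if r.1 = none then s + r.2 else s) 0))
          none)) action.2
      (overwriteB (runsB dest)
        ((runsB dest).foldl (fun s r => if r.1 = none then s + r.2 else s) 0
          - min L ((runsB dest).foldl (fun s r => if r.1 = none then s + r.2 else s) 0))
        ((runsB dest).foldl (fun s r => if r.1 = none then s + r.2 else s) 0) (some c)) := by
  obtain ⟨hp_eq, hc, hT_eq⟩ := parse_facts origin p L c tl heq hL htail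
  have hplt : p < origin.length := (List.getElem?_eq_some_iff.mp hc).1
  have hpL : p + L ≤ origin.length := by
    rw [heq]; simp
  -- origin.drop p starts with the color to transfer
  have hdropp : origin.drop p = some c :: origin.drop (p + 1) := by
    rw [List.drop_eq_getElem_cons hplt]
    have := (List.getElem?_eq_some_iff.mp hc).2
    rw [this]
  -- A's second while loop stops at p + L
  have hrun : runEndA origin c (p + 1) = p + L := by
    rw [runEndA_spec origin c (p + 1) (by omega)]
    have : ((origin.drop (p + 1)).takeWhile (fun x => x == some c)).length = L - 1 := by
      rw [hdropp] at hT_eq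
      rw [List.takeWhile_cons_of_pos (by simp)] at hT_eq
      simp at hT_eq
      omega
    rw [this]
    omega
  -- the two capacity computations agree
  have hcap : (runsB dest).foldl (fun s r => if r.1 = none then s + r.2 else s) 0
      = PySem.List.count dest none := by
    rw [capacity_fold, decodeR_runsB, PySem.List.count_eq]
    simp
  simp only [hcap]
  rw [hrun]
  simp only [Nat.add_sub_cancel_left]
  set recv := PySem.List.count dest none with hrecv
  have hrecvle : recv ≤ dest.length := by
    rw [hrecv, PySem.List.count_eq]
    exact List.count_le_length
  set moved := min L recv with hmoved
  have hmT : moved ≤ L := by omega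
  have hmr : moved ≤ recv := by omega
  -- origin side: A's emptying loop = B's run splice, both a take/replicate/drop form
  have hBor : overwriteB (runsB origin) p (p + moved) none
      = origin.take p ++ List.replicate moved none ++ origin.drop (p + moved) := by
    rw [overwriteB_eq origin p (p + moved) none (by omega),
      spl_eq_take_rep_drop origin p (p + moved) none (by omega) (by omega),
      Nat.add_sub_cancel_left]
  have hAor : (List.range' p moved).foldl (fun t k => t.set k none) origin
      = origin.take p ++ List.replicate moved none ++ origin.drop (p + moved) :=
    foldl_set_range' none moved p origin (by omega)
  -- destination side: A's filling loop = B's run splice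
  have hBde : overwriteB (runsB dest) (recv - moved) recv (some c)
      = dest.take (recv - moved) ++ List.replicate moved (some c) ++ dest.drop recv := by
    rw [overwriteB_eq dest _ _ _ (by omega),
      spl_eq_take_rep_drop dest _ _ _ (by omega) (by omega)]
    have : recv - (recv - moved) = moved := by omega
    rw [this]
  have hAde : (List.range' (recv - moved) moved).foldl (fun t k => t.set k (some c)) dest
      = dest.take (recv - moved) ++ List.replicate moved (some c) ++ dest.drop recv := by
    have h' := foldl_set_range' (some c) moved (recv - moved) dest (by omega)
    rw [h']
    have : recv - moved + moved = recv := by omega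
    rw [this]
  rw [hrs] at hBor
  rw [hAor, hAde, hBor, hBde]

-- ===== VERDICT (by name: the statement is the Claim_ definition above) =====
theorem result_spec : Claim_equal_result := by
  unfold Claim_equal_result
  intro state action _ hpre
  obtain ⟨h1, h2, h3⟩ := hpre
  unfold Spec_result
  simp only [result, result_alt]
  set origin := (PySem.List.pyGet? state action.1).getD [] with horig
  set dest := (PySem.List.pyGet? state action.2).getD [] with hdest
  have hdecO := decodeR_runsB origin
  have hwfO := wf_runsB origin
  -- destruct the RLE of the origin: the first one or two runs carry (blanks, color, run_len)
  rcases hrs : runsB origin with _ | ⟨⟨v0, n0⟩, rest⟩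
  · rw [hrs] at hdecO
    simp [decodeR] at hdecO
    rw [hdecO] at h3
    simp at h3
  · rw [hrs] at hdecO hwfO
    obtain ⟨hpos, hchain⟩ := hwfO
    rcases v0 with _ | c0
    · rcases rest with _ | ⟨⟨v1, n1⟩, rest2⟩
      · -- all-None origin: contradicts Pre_
        exfalso
        have horep : origin = List.replicate n0 none := by
          rw [← hdecO]; simp [decodeR]
        rw [horep] at h3
        simp at h3
      · rcases v1 with _ | c1
        · -- two adjacent None runs: impossible in an RLE
          exfalso
          rw [List.isChain_cons_cons] at hchain
          exact hchain.1 rfl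
        · -- leading None run of length n0, then the color run (c1, n1)
          have heq : origin = List.replicate n0 none
              ++ (List.replicate n1 (some c1) ++ decodeR rest2) := by
            rw [← hdecO]; simp [decodeR]
          have hL : 1 ≤ n1 := hpos (some c1, n1) (by simp)
          have htail : ∀ x ∈ (decodeR rest2).head?, x ≠ some c1 := by
            refine decodeR_head_ne rest2 c1 (fun r hr => hpos r (by simp [hr])) ?_
            intro r hr
            rw [List.isChain_cons_cons] at hchain
            cases rest2 with
            | nil => simp at hr
            | cons r2 rs2 =>
              simp at hr
              subst hr
              have := (List.isChain_cons_cons.mp hchain.2).1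
              exact fun h => this h.symm
          obtain ⟨hp_eq, hc, _⟩ := parse_facts origin n0 n1 c1 (decodeR rest2) heq hL htail
          have hfind : findTopA origin 0 = some (n0, c1) := by
            rw [findTopA_spec origin 0 (by omega)]
            simp only [List.drop_zero, Nat.zero_add, hp_eq]
            rw [hc]
          rw [hfind]
          exact result_core state action origin dest _ n0 n1 c1 (decodeR rest2) hrs heq hL htail
    · -- the origin starts directly with the color run (c0, n0)
      have heq : origin = List.replicate 0 none
          ++ (List.replicate n0 (some c0) ++ decodeR rest) := by
        rw [← hdecO]; simp [decodeR]
      have hL : 1 ≤ n0 := hpos (some c0, n0) (by simp)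
      have htail : ∀ x ∈ (decodeR rest).head?, x ≠ some c0 := by
        refine decodeR_head_ne rest c0 (fun r hr => hpos r (by simp [hr])) ?_
        intro r hr
        cases rest with
        | nil => simp at hr
        | cons r2 rs2 =>
          simp at hr
          subst hr
          have := (List.isChain_cons_cons.mp hchain).1
          exact fun h => this h.symm
      obtain ⟨hp_eq, hc, _⟩ := parse_facts origin 0 n0 c0 (decodeR rest) heq hL htail
      have hfind : findTopA origin 0 = some (0, c0) := by
        rw [findTopA_spec origin 0 (by omega)]
        simp only [List.drop_zero, Nat.zero_add, hp_eq]
        rw [hc]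
      rw [hfind]
      exact result_core state action origin dest _ 0 n0 c0 (decodeR rest) hrs heq hL htail
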